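-- pv_equiv track=rewrite | github.com/Bhanupriya-art/CSE408-Coursera-Answers | Dynamic Programming, Greedy Algorithms/Week 2/Problem Set 2.py | memoizeLSS
-- ===== SOURCE A (Python) =====
-- def memoizeLSS(a):
--     T = {} # Initialize the memo table to an empty dictionary
--     # Populate the entries for the base case
--     n = len(a)
--     for j in range(-1, n):
--         T[(n, j)] = 0  # i = n and j
--     # Fill out the table
--     for i in range(n-1, -1, -1):  # Iterate backward for i
--         for j in range(i-1, -2, -1):  # Iterate backward for j
--             aj = a[j] if j >= 0 else None
--             if j == -1 or (aj is not None and abs(a[i] - aj) <= 1):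
--                 T[(i, j)] = max(1 + T[(i+1, i)], T[(i+1, j)])
--             else:
--                 T[(i, j)] = T[(i+1, j)]
--     return T
-- ===== SOURCE B (Python) =====
-- def memoizeLSS(a):
--     n = len(a)
--     # Column-major DP: each column j of the table is a suffix running maximum
--     # over "compatible" positions of 1 + diag, where diag[k] holds the value of
--     # the diagonal state (k, k-1) (the only cross-column value the recurrence reads).
--     diag = [0] * (n + 1)          # diag[k] = value of state (k, k-1); diag[n] = 0
--     cols = []                     # after the loop, cols[j + 1] is column j
--     for j in range(n - 1, -2, -1):
--         col = [0] * (n + 1)       # col[i] = value of state (i, j), for j < i <= n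
--         best = 0                  # running suffix maximum = value of state (i+1, j)
--         for i in range(n - 1, j, -1):
--             if j == -1 or abs(a[i] - a[j]) <= 1:
--                 best = max(best, 1 + diag[i + 1])
--             col[i] = best
--         cols.insert(0, col)
--         if j >= 0:
--             diag[j + 1] = col[j + 1]
--     T = {(n, j): 0 for j in range(-1, n)}
--     for i in range(n - 1, -1, -1):
--         for j in range(i - 1, -2, -1):
--             T[(i, j)] = cols[j + 1][i]
--     return T
-- ===== Notes on version B (the rewrite author's own statement) =====
-- stated objective: alternative
-- what changed: B transposes the DP: instead of A's row-major double loop doing per-key dict inserts with pairwise max of two dict lookups, B computes the table column by column (j outer, i inner), where each column is a suffix running maximum of 1+diag over compatible positions, with a separate diag array caching the diagonal states (k,k-1) that are the only cross-column reads; the dict is assembled once at the end.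
import Mathlib
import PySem

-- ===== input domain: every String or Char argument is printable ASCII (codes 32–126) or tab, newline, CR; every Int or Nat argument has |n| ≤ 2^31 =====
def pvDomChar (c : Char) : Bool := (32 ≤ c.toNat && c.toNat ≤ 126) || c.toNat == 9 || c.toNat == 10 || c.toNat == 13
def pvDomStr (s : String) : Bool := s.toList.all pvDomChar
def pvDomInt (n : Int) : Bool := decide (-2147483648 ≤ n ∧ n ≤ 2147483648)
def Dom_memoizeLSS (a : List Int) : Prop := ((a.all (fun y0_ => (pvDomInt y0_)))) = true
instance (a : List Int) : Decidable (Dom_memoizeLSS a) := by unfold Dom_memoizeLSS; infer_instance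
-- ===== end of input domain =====

-- B replaces A's row-major dict-table DP with a column-major computation: each
-- column of the table is a suffix running maximum of 1 + diag over compatible
-- positions, with a diag array caching the diagonal states (k, k-1) — the only
-- values the recurrence reads across columns; objective: alternative, same cost.


-- ===== PORT A =====
def memoizeLSS (a : List Int) : List (Int × Int × Int) :=
  let n : Int := (a.length : Int)
  -- base case: T[(n, j)] = 0 for j in range(-1, n)
  let T0 : PySem.Dict (Int × Int) Int :=
    (PySem.List.pyRange (-1) n 1).foldl (fun T j => T.insert (n, j) 0) PySem.Dict.empty
  -- fill the table backward
  let T : PySem.Dict (Int × Int) Int :=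
    (PySem.List.pyRange (n - 1) (-1) (-1)).foldl
      (fun T i =>
        (PySem.List.pyRange (i - 1) (-2) (-1)).foldl
          (fun T j =>
            let aj : Option Int := if 0 ≤ j then PySem.List.pyGet? a j else none
            -- a[i]: i is always a valid index here (0 ≤ i < len a)
            let ai : Int := PySem.List.pyGetD a i 0
            -- Python's T[(i+1, i)] / T[(i+1, j)]: both keys are always present (KeyError impossible)
            if (j == -1) || (match aj with | some v => decide (|ai - v| ≤ 1) | none => false) then
              T.insert (i, j) (max (1 + T.getD (i + 1, i) 0) (T.getD (i + 1, j) 0))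
            else
              T.insert (i, j) (T.getD (i + 1, j) 0))
          T)
      T0
  T.items.map (fun p => (p.1.1, p.1.2, p.2))

-- ===== PORT B =====
-- B-side helpers: the two loop bodies of Source B (inner loop over i for one column j;
-- outer loop over columns j), used literally by the fold in memoizeLSS_alt.
def stepInnerB (a : List Int) (j : Int) (diag : List Int) (cb : List Int × Int) (i : Int) :
    List Int × Int :=
  -- Python: if j == -1 or abs(a[i] - a[j]) <= 1: best = max(best, 1 + diag[i+1]); col[i] = best
  let best : Int :=
    if (j == -1) || decide (|PySem.List.pyGetD a i 0 - PySem.List.pyGetD a j 0| ≤ 1) then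
      max cb.2 (1 + PySem.List.pyGetD diag (i + 1) 0)
    else cb.2
  (PySem.List.pySetD cb.1 i best, best)

def stepOuterB (a : List Int) (s : List Int × List (List Int)) (j : Int) :
    List Int × List (List Int) :=
  -- col = [0]*(n+1); best = 0; inner loop; cols.insert(0, col); if j >= 0: diag[j+1] = col[j+1]
  let cb : List Int × Int :=
    (PySem.List.pyRange ((a.length : Int) - 1) j (-1)).foldl (stepInnerB a j s.1)
      (List.replicate (a.length + 1) 0, 0)
  (if decide (0 ≤ j) then PySem.List.pySetD s.1 (j + 1) (PySem.List.pyGetD cb.1 (j + 1) 0)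
   else s.1,
   cb.1 :: s.2)

def memoizeLSS_alt (a : List Int) : List (Int × Int × Int) :=
  let n : Int := (a.length : Int)
  -- diag = [0]*(n+1); cols = []; for j in range(n-1, -2, -1): ...
  let dc : List Int × List (List Int) :=
    (PySem.List.pyRange (n - 1) (-2) (-1)).foldl (stepOuterB a)
      (List.replicate (a.length + 1) 0, [])
  -- T = {(n, j): 0 for j in range(-1, n)}; then T[(i, j)] = cols[j+1][i] (distinct keys)
  let base : List (Int × Int × Int) := (PySem.List.pyRange (-1) n 1).map (fun j => (n, j, (0 : Int)))
  (PySem.List.pyRange (n - 1) (-1) (-1)).foldl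
    (fun items i =>
      items ++ (PySem.List.pyRange (i - 1) (-2) (-1)).map
        (fun j => (i, j, PySem.List.pyGetD (PySem.List.pyGetD dc.2 (j + 1) []) i 0)))
    base

-- ===== PRECONDITION & SPEC =====
def Spec_memoizeLSS (a : List Int) (out : List (Int × Int × Int)) : Prop := out = memoizeLSS_alt a
instance (a : List Int) (out : List (Int × Int × Int)) : Decidable (Spec_memoizeLSS a out) := by unfold Spec_memoizeLSS; infer_instance

-- ===== CLAIM (what is proved, stated in full; the proofs are below) =====
def Claim_equal_memoizeLSS : Prop := ∀ (a : List Int), Dom_memoizeLSS a → Spec_memoizeLSS a (memoizeLSS a)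

-- ===== LEMMAS AND PROOFS =====

-- the common value function: rowV a t j = value of DP state (a.length - t, j)
def rowV (a : List Int) : Nat → Int → Int
  | 0, _ => 0
  | t + 1, j =>
      if 0 ≤ j ∧ 1 < |PySem.List.pyGetD a ((a.length : Int) - (t + 1)) 0 - PySem.List.pyGetD a j 0| then
        rowV a t j
      else
        max (1 + rowV a t ((a.length : Int) - (t + 1))) (rowV a t j)

-- the canonical item list both ports produce (as dict pairs)
def rowPairs (a : List Int) (k : Nat) : List ((Int × Int) × Int) :=
  (PySem.List.pyRange ((a.length : Int) - k - 1) (-2) (-1)).map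
    (fun j => (((a.length : Int) - k, j), rowV a k j))

def basePairs (a : List Int) : List ((Int × Int) × Int) :=
  (PySem.List.pyRange (-1) (a.length : Int) 1).map (fun j => (((a.length : Int), j), (0 : Int)))

def canonPairs (a : List Int) : List ((Int × Int) × Int) :=
  basePairs a ++ (List.range a.length).flatMap (fun t => rowPairs a (t + 1))

lemma pyGetD_append_left' {α : Type} (xs ys : List α) (m : Int) (d : α)
    (h0 : 0 ≤ m) (h1 : m < (xs.length : Int)) :
    PySem.List.pyGetD (xs ++ ys) m d = PySem.List.pyGetD xs m d := by
  rw [PySem.List.pyGetD_eq_getElem _ d h0 (by simp; omega),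
      PySem.List.pyGetD_eq_getElem _ d h0 h1]
  exact List.getElem_append_left (by omega)

-- ---------- A side ----------

def innerStepA (a : List Int) (i : Int) (T : PySem.Dict (Int × Int) Int) (j : Int) :
    PySem.Dict (Int × Int) Int :=
  let aj : Option Int := if 0 ≤ j then PySem.List.pyGet? a j else none
  let ai : Int := PySem.List.pyGetD a i 0
  if (j == -1) || (match aj with | some v => decide (|ai - v| ≤ 1) | none => false) then
    T.insert (i, j) (max (1 + T.getD (i + 1, i) 0) (T.getD (i + 1, j) 0))
  else
    T.insert (i, j) (T.getD (i + 1, j) 0)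

def stepA (a : List Int) (T : PySem.Dict (Int × Int) Int) (i : Int) : PySem.Dict (Int × Int) Int :=
  (PySem.List.pyRange (i - 1) (-2) (-1)).foldl (innerStepA a i) T

def baseA (a : List Int) : PySem.Dict (Int × Int) Int :=
  (PySem.List.pyRange (-1) (a.length : Int) 1).foldl
    (fun T j => T.insert ((a.length : Int), j) 0) PySem.Dict.empty

lemma memoizeLSS_unfold (a : List Int) :
    memoizeLSS a =
      ((PySem.List.pyRange ((a.length : Int) - 1) (-1) (-1)).foldl (stepA a) (baseA a)).items.map
        (fun p => (p.1.1, p.1.2, p.2)) := rfl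

def LookOK (a : List Int) (t : Nat) (D : PySem.Dict (Int × Int) Int) : Prop :=
  ∀ j : Int, -1 ≤ j → j ≤ (a.length : Int) - t - 1 →
    D.getD ((a.length : Int) - t, j) 0 = rowV a t j

def KeysHigh (i : Int) (D : PySem.Dict (Int × Int) Int) : Prop :=
  ∀ p ∈ D.items, i ≤ p.1.1

lemma innerStepA_val (a : List Int) (t : Nat) (ht : t < a.length)
    (D : PySem.Dict (Int × Int) Int) (j : Int) (hD : LookOK a t D)
    (hj1 : -1 ≤ j) (hj2 : j ≤ (a.length : Int) - t - 2) :
    innerStepA a ((a.length : Int) - t - 1) D j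
      = D.insert ((a.length : Int) - t - 1, j) (rowV a (t + 1) j) := by
  have hkey1 : (a.length : Int) - t - 1 + 1 = (a.length : Int) - t := by ring
  have hli : rowV a (t + 1) j =
      if 0 ≤ j ∧ 1 < |PySem.List.pyGetD a ((a.length : Int) - t - 1) 0 - PySem.List.pyGetD a j 0|
      then rowV a t j
      else max (1 + rowV a t ((a.length : Int) - t - 1)) (rowV a t j) := by
    have e : (a.length : Int) - (↑t + 1) = (a.length : Int) - t - 1 := by ring
    simp only [rowV, e]
  have hget1 : D.getD ((a.length : Int) - t - 1 + 1, (a.length : Int) - t - 1) 0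
      = rowV a t ((a.length : Int) - t - 1) := by
    rw [hkey1]; exact hD _ (by omega) (by omega)
  have hget2 : D.getD ((a.length : Int) - t - 1 + 1, j) 0 = rowV a t j := by
    rw [hkey1]; exact hD _ hj1 (by omega)
  by_cases hneg : j = -1
  · subst hneg
    simp only [innerStepA, if_neg (by omega : ¬ (0:Int) ≤ -1)]
    rw [if_pos (by simp)]
    rw [hget1, hget2, hli, if_neg (by omega), show (a.length:Int) - t - 1 = (a.length:Int) - t - 1 from rfl]
  · have hj0 : 0 ≤ j := by omega
    have hjlt : j < (a.length : Int) := by omega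
    have hsome : PySem.List.pyGet? a j = some (a[j.toNat]'(by omega)) :=
      PySem.List.pyGet?_eq_some_getElem a hj0 (by simpa using hjlt)
    have haj : PySem.List.pyGetD a j 0 = a[j.toNat]'(by omega) :=
      PySem.List.pyGetD_eq_getElem a 0 hj0 (by simpa using hjlt)
    simp only [innerStepA, if_pos hj0, hsome]
    by_cases hc : |PySem.List.pyGetD a ((a.length : Int) - t - 1) 0 - a[j.toNat]'(by omega)| ≤ 1
    · rw [if_pos (by simp [hc]), hget1, hget2, hli, haj, if_neg (by omega)]
    · rw [if_neg (by simp [hc, hneg]), hget2, hli, haj, if_pos (by constructor <;> omega)]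

lemma innerA (a : List Int) (t : Nat) (ht : t < a.length) :
    ∀ c : Nat, (c : Int) ≤ (a.length : Int) - t →
    ∀ D : PySem.Dict (Int × Int) Int,
    LookOK a t D →
    KeysHigh ((a.length : Int) - t - 1) D →
    (∀ j : Int, j ≤ (c : Int) - 2 → D.contains ((a.length : Int) - t - 1, j) = false) →
    ∀ R, R = (PySem.List.pyRange ((c : Int) - 2) (-2) (-1)).foldl
        (innerStepA a ((a.length : Int) - t - 1)) D →
    (R.items = D.items ++ (PySem.List.pyRange ((c : Int) - 2) (-2) (-1)).map
        (fun j => (((a.length : Int) - t - 1, j), rowV a (t + 1) j)))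
    ∧ (∀ j : Int, -1 ≤ j → j ≤ (c : Int) - 2 →
        R.getD ((a.length : Int) - t - 1, j) 0 = rowV a (t + 1) j)
    ∧ (∀ j : Int, (c : Int) - 2 < j →
        R.getD ((a.length : Int) - t - 1, j) 0 = D.getD ((a.length : Int) - t - 1, j) 0)
    ∧ KeysHigh ((a.length : Int) - t - 1) R := by
  intro c
  induction c with
  | zero =>
      intro hc D hD hK hF R hR
      rw [PySem.List.pyRange_neg_one_eq_nil (by omega)] at hR
      simp only [List.foldl_nil] at hR
      subst hR
      refine ⟨by rw [PySem.List.pyRange_neg_one_eq_nil (by omega)]; simp, ?_, ?_, hK⟩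
      · intro j h1 h2; omega
      · intro j _; rfl
  | succ c ih =>
      intro hc D hD hK hF R hR
      have hm : ((c + 1 : Nat) : Int) - 2 = (c : Int) - 1 := by push_cast; ring
      rw [hm, PySem.List.pyRange_neg_one_cons (by omega), List.foldl_cons] at hR
      have hstep : innerStepA a ((a.length : Int) - t - 1) D ((c : Int) - 1)
          = D.insert ((a.length : Int) - t - 1, (c : Int) - 1) (rowV a (t + 1) ((c : Int) - 1)) :=
        innerStepA_val a t ht D _ hD (by omega) (by omega)
      have hmm : (c : Int) - 1 - 1 = (c : Int) - 2 := by ring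
      rw [hstep, hmm] at hR
      set D' := D.insert ((a.length : Int) - t - 1, (c : Int) - 1)
          (rowV a (t + 1) ((c : Int) - 1)) with hD'
      have hD'look : LookOK a t D' := by
        intro j h1 h2
        rw [hD', PySem.Dict.getD_insert, if_neg (by intro h; injection h with h1' h2'; omega)]
        exact hD j h1 h2
      have hD'keys : KeysHigh ((a.length : Int) - t - 1) D' := by
        intro p hp
        rw [hD', PySem.Dict.mem_items_insert] at hp
        rcases hp with h | ⟨h, _⟩
        · subst h; simp
        · exact hK p h
      have hD'fresh : ∀ j : Int, j ≤ (c : Int) - 2 → D'.contains ((a.length : Int) - t - 1, j) = false := by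
        intro j hj
        rw [hD', PySem.Dict.contains_insert]
        have : (((a.length : Int) - t - 1, j) == ((a.length : Int) - t - 1, (c : Int) - 1)) = false := by
          simp only [beq_eq_false_iff_ne, ne_eq, Prod.mk.injEq, not_and]
          intro _; omega
        rw [this, hF j (by omega)]
        rfl
      obtain ⟨h1, h2, h3, h4⟩ := ih (by omega) D' hD'look hD'keys hD'fresh R hR
      have hDitems : D'.items = D.items ++ [(((a.length : Int) - t - 1, (c : Int) - 1), rowV a (t + 1) ((c : Int) - 1))] := by
        rw [hD', PySem.Dict.items_insert_of_not_contains _ _ (hF _ (by omega))]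
      refine ⟨?_, ?_, ?_, h4⟩
      · rw [h1, hDitems, hm,
            PySem.List.pyRange_neg_one_cons (show (-2:Int) < (c:Int) - 1 from by omega),
            List.map_cons, hmm]
        simp
      · intro j hj1 hj2
        rw [hm] at hj2
        by_cases hje : j ≤ (c : Int) - 2
        · exact h2 j hj1 hje
        · have hje' : j = (c : Int) - 1 := by omega
          subst hje'
          rw [h3 _ (by omega), hD', PySem.Dict.getD_insert, if_pos rfl]
      · intro j hj
        rw [hm] at hj
        rw [h3 j (by omega), hD', PySem.Dict.getD_insert, if_neg (by intro h; injection h with h1' h2'; omega)]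

lemma outerA (a : List Int) : ∀ c t : Nat, c + t = a.length →
    ∀ D : PySem.Dict (Int × Int) Int,
    LookOK a t D → KeysHigh ((a.length : Int) - t) D →
    ∀ R, R = (PySem.List.pyRange ((c : Int) - 1) (-1) (-1)).foldl (stepA a) D →
    R.items = D.items ++ (List.range c).flatMap (fun s => rowPairs a (t + s + 1)) := by
  intro c
  induction c with
  | zero =>
      intro t hct D hD hK R hR
      rw [show ((0:Nat):Int) - 1 = -1 by norm_num, PySem.List.pyRange_neg_one_eq_nil (by omega)] at hR
      simp only [List.foldl_nil] at hR
      subst hR; simp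
  | succ c ih =>
      intro t hct D hD hK R hR
      have ht : t < a.length := by omega
      have hm : ((c + 1 : Nat) : Int) - 1 = (c : Int) := by push_cast; ring
      rw [hm, PySem.List.pyRange_neg_one_cons (by omega), List.foldl_cons] at hR
      have hcval : (c : Int) = (a.length : Int) - t - 1 := by omega
      have hfresh : ∀ j : Int, j ≤ ((c + 1 : Nat) : Int) - 2 →
          D.contains ((a.length : Int) - t - 1, j) = false := by
        intro j _
        rw [PySem.Dict.contains_eq_decide_mem_keys, decide_eq_false_iff_not]
        intro hmem
        simp only [PySem.Dict.keys, List.mem_map] at hmem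
        obtain ⟨p, hp, hpe⟩ := hmem
        have := hK p hp
        rw [hpe] at this
        simp only at this
        omega
      have e2 : (a.length : Int) - ↑t - 1 - 1 = ((c + 1 : Nat) : Int) - 2 := by
        push_cast; omega
      have hstepA : stepA a D (c : Int)
          = (PySem.List.pyRange (((c + 1 : Nat) : Int) - 2) (-2) (-1)).foldl
              (innerStepA a ((a.length : Int) - t - 1)) D := by
        rw [stepA, hcval, e2]
      obtain ⟨h1, h2, _, h4⟩ := innerA a t ht (c + 1) (by omega) D hD
        (fun p hp => le_trans (by omega) (hK p hp)) hfresh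
        (stepA a D (c : Int)) hstepA
      have hlook' : LookOK a (t + 1) (stepA a D (c : Int)) := by
        intro j hj1 hj2
        have e : (a.length : Int) - ((t : Int) + 1) = (a.length : Int) - t - 1 := by ring
        rw [Nat.cast_add, Nat.cast_one, e]
        exact h2 j hj1 (by push_cast; omega)
      have hkeys' : KeysHigh ((a.length : Int) - (t + 1)) (stepA a D (c : Int)) := by
        intro p hp
        have := h4 p hp
        omega
      have := ih (t + 1) (by omega) (stepA a D (c : Int)) hlook' hkeys' R hR
      rw [this, h1]
      rw [List.range_succ_eq_map, List.flatMap_cons, List.flatMap_map]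
      have hrow : (PySem.List.pyRange (((c + 1 : Nat) : Int) - 2) (-2) (-1)).map
          (fun j => (((a.length : Int) - t - 1, j), rowV a (t + 1) j)) = rowPairs a (t + 1) := by
        rw [rowPairs,
          show (a.length : Int) - ↑(t + 1) - 1 = ((c + 1 : Nat) : Int) - 2 from by push_cast; omega,
          show (a.length : Int) - ↑(t + 1) = (a.length : Int) - ↑t - 1 from by push_cast; omega]
      rw [hrow]
      simp only [Nat.add_zero, List.append_assoc]
      congr 1
      congr 1
      apply List.flatMap_congr
      intro s _
      congr 1
      omega

lemma baseA_items (a : List Int) : (baseA a).items = basePairs a := by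
  rw [baseA, basePairs,
    PySem.Dict.items_foldl_insert_fresh _ (fun j => (((a.length : Int)), j)) (fun _ => 0) _
      (fun x _ => PySem.Dict.contains_empty _)
      ((PySem.List.nodup_pyRange_one _ _).map (fun x y h => by injection h))]
  rfl

lemma baseA_keys_nodup (a : List Int) : (baseA a).keys.Nodup := by
  have : (baseA a).keys = (PySem.List.pyRange (-1) (a.length : Int) 1).map
      (fun j => (((a.length : Int)), j)) := by
    simp only [PySem.Dict.keys, baseA_items, basePairs, List.map_map]
    rfl
  rw [this]
  exact (PySem.List.nodup_pyRange_one _ _).map (fun x y h => by injection h)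

lemma baseA_look (a : List Int) : LookOK a 0 (baseA a) := by
  intro j hj1 hj2
  have hmem : (((a.length : Int), j), (0 : Int)) ∈ (baseA a).items := by
    rw [baseA_items, basePairs, List.mem_map]
    exact ⟨j, PySem.List.mem_pyRange_one.mpr ⟨by omega, by omega⟩, rfl⟩
  have := PySem.Dict.getD_of_mem_items _ hmem (baseA_keys_nodup a) 0
  rw [show (a.length : Int) - (0 : Nat) = (a.length : Int) by push_cast; ring]
  rw [this, rowV]

lemma baseA_keys (a : List Int) : KeysHigh ((a.length : Int) - (0 : Nat)) (baseA a) := by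
  intro p hp
  rw [baseA_items, basePairs, List.mem_map] at hp
  obtain ⟨j, _, hj⟩ := hp
  subst hj
  push_cast
  omega

theorem memoizeLSS_eq_canon (a : List Int) :
    memoizeLSS a = (canonPairs a).map (fun p => (p.1.1, p.1.2, p.2)) := by
  rw [memoizeLSS_unfold]
  have := outerA a a.length 0 (by omega) (baseA a) (baseA_look a) (baseA_keys a) _ rfl
  rw [this, baseA_items, canonPairs]
  congr 2
  apply List.flatMap_congr
  intro s _
  congr 1
  omega

-- ---------- B side ----------

-- pyGetD after pySetD, Int indices in range
lemma pyGetD_pySetD_int (xs : List Int) (i m v d : Int)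
    (hi0 : 0 ≤ i) (_hi : i < (xs.length : Int)) (hm0 : 0 ≤ m) (hm : m < (xs.length : Int)) :
    PySem.List.pyGetD (PySem.List.pySetD xs i v) m d
      = if m = i then v else PySem.List.pyGetD xs m d := by
  rw [PySem.List.pySetD_of_nonneg xs v hi0,
      PySem.List.pyGetD_eq_getElem _ d hm0 (by simp; omega),
      PySem.List.pyGetD_eq_getElem _ d hm0 hm,
      List.getElem_set]
  split_ifs with h1 h2 h2
  · rfl
  · omega
  · omega
  · rfl

-- diag[k] = value of state (k, k-1), for levels k ≥ c already computed
def DiagOK (a : List Int) (c : Int) (diag : List Int) : Prop :=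
  ∀ k : Int, c ≤ k → 1 ≤ k → k ≤ (a.length : Int) →
    PySem.List.pyGetD diag k 0 = rowV a ((a.length : Int) - k).toNat (k - 1)

-- col[i] = value of state (i, j) for all j < i ≤ n
def ColOK (a : List Int) (j : Int) (col : List Int) : Prop :=
  ∀ i : Int, j + 1 ≤ i → i ≤ (a.length : Int) →
    PySem.List.pyGetD col i 0 = rowV a ((a.length : Int) - i).toNat j

lemma innerB (a : List Int) (j : Int) (hj : -1 ≤ j) (diag : List Int)
    (hd : DiagOK a (j + 2) diag) :
    ∀ c : Nat, j + c ≤ (a.length : Int) - 1 →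
    ∀ col best, col.length = a.length + 1 →
    best = rowV a ((a.length : Int) - (j + c + 1)).toNat j →
    (∀ m : Int, j + c + 1 ≤ m → m ≤ (a.length : Int) →
      PySem.List.pyGetD col m 0 = rowV a ((a.length : Int) - m).toNat j) →
    ∀ R, R = (PySem.List.pyRange (j + c) j (-1)).foldl (stepInnerB a j diag) (col, best) →
    R.1.length = a.length + 1 ∧ ColOK a j R.1 := by
  intro c
  induction c with
  | zero =>
      intro hc col best hlen hbest hcol R hR
      rw [show j + (0 : Nat) = j by push_cast; ring] at hR
      rw [PySem.List.pyRange_neg_one_eq_nil le_rfl] at hR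
      simp only [List.foldl_nil] at hR
      subst hR
      exact ⟨hlen, fun m h1 h2 => hcol m (by push_cast; omega) h2⟩
  | succ c ih =>
      intro hc col best hlen hbest hcol R hR
      set i : Int := j + (c + 1 : Nat) with hi
      have hii : i = j + c + 1 := by rw [hi]; push_cast; ring
      have hilt : i ≤ (a.length : Int) - 1 := by omega
      rw [PySem.List.pyRange_neg_one_cons (by omega), List.foldl_cons] at hR
      -- value of the step at index i
      set t : Nat := ((a.length : Int) - (i + 1)).toNat with htdef
      have hti : (a.length : Int) - (t + 1) = i := by omega
      have ht1 : ((a.length : Int) - i).toNat = t + 1 := by omega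
      have hbest' : best = rowV a t j := hbest
      have hdiag : PySem.List.pyGetD diag (i + 1) 0 = rowV a t i := by
        have := hd (i + 1) (by omega) (by omega) (by omega)
        rw [this, show i + 1 - 1 = i from by omega,
            show ((a.length : Int) - (i + 1)).toNat = t from rfl]
      have hval : (stepInnerB a j diag (col, best) i).2 = rowV a (t + 1) j := by
        have hrv : rowV a (t + 1) j =
            if 0 ≤ j ∧ 1 < |PySem.List.pyGetD a i 0 - PySem.List.pyGetD a j 0|
            then rowV a t j
            else max (1 + rowV a t i) (rowV a t j) := by
          simp only [rowV]
          rw [show (a.length : Int) - (↑t + 1) = i from by omega]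
        rw [stepInnerB, hrv]
        by_cases hneg : j = -1
        · rw [if_pos (by simp [hneg]), if_neg (by omega), hbest', hdiag, max_comm]
        · by_cases habs : |PySem.List.pyGetD a i 0 - PySem.List.pyGetD a j 0| ≤ 1
          · rw [if_pos (by simp [habs]), if_neg (by push Not; intro _; omega), hbest', hdiag, max_comm]
          · rw [if_neg (by simp [hneg, habs]), if_pos ⟨by omega, by omega⟩, hbest']
      have hcol' : (stepInnerB a j diag (col, best) i).1
          = PySem.List.pySetD col i (rowV a (t + 1) j) := by
        rw [show (stepInnerB a j diag (col, best) i).1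
            = PySem.List.pySetD col i (stepInnerB a j diag (col, best) i).2 from rfl, hval]
      have hstep : stepInnerB a j diag (col, best) i
          = (PySem.List.pySetD col i (rowV a (t + 1) j), rowV a (t + 1) j) := by
        rw [Prod.ext_iff]
        exact ⟨hcol', hval⟩
      rw [hstep, show i - 1 = j + (c : Nat) from by omega] at hR
      apply ih (by omega) _ _ ?_ ?_ ?_ R hR
      · rw [PySem.List.pySetD_of_nonneg _ _ (by omega), List.length_set, hlen]
      · rw [show ((a.length : Int) - (j + ↑c + 1)).toNat = t + 1 from by omega]
      · intro m h1 h2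
        rw [pyGetD_pySetD_int col i m _ 0 (by omega) (by omega) (by omega) (by omega)]
        by_cases hmi : m = i
        · rw [if_pos hmi, hmi, show ((a.length : Int) - i).toNat = t + 1 from ht1]
        · rw [if_neg hmi]
          exact hcol m (by omega) h2

lemma outerB (a : List Int) : ∀ c : Nat, (c : Int) ≤ (a.length : Int) + 1 →
    ∀ diag cols, diag.length = a.length + 1 →
    DiagOK a (c : Int) diag →
    ∀ R, R = (PySem.List.pyRange ((c : Int) - 2) (-2) (-1)).foldl (stepOuterB a) (diag, cols) →
    ∃ L : List (List Int), R.2 = L ++ cols ∧ L.length = c ∧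
      ∀ j : Int, -1 ≤ j → j ≤ (c : Int) - 2 → ColOK a j (PySem.List.pyGetD L (j + 1) []) := by
  intro c
  induction c with
  | zero =>
      intro hc diag cols hdl hd R hR
      rw [show ((0 : Nat) : Int) - 2 = -2 by norm_num,
          PySem.List.pyRange_neg_one_eq_nil le_rfl] at hR
      simp only [List.foldl_nil] at hR
      subst hR
      exact ⟨[], by simp, rfl, fun j h1 h2 => absurd h2 (by omega)⟩
  | succ c ih =>
      intro hc diag cols hdl hd R hR
      set j : Int := (c : Int) - 1 with hjdef
      have hj : -1 ≤ j := by omega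
      have hm : ((c + 1 : Nat) : Int) - 2 = j := by push_cast; omega
      rw [hm, PySem.List.pyRange_neg_one_cons (by omega), List.foldl_cons,
          show j - 1 = (c : Int) - 2 from by omega] at hR
      -- the inner fold computes column j
      set cb := (PySem.List.pyRange ((a.length : Int) - 1) j (-1)).foldl (stepInnerB a j diag)
        (List.replicate (a.length + 1) 0, 0) with hcb
      have hdj2 : DiagOK a (j + 2) diag := by
        intro k h1 h2 h3
        exact hd k (by omega) h2 h3
      have hcnt : j + (((a.length : Int) - 1 - j).toNat : Int) = (a.length : Int) - 1 := by omega
      obtain ⟨hclen, hcok⟩ := innerB a j hj diag hdj2 (((a.length : Int) - 1 - j).toNat)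
        (by omega)
        (List.replicate (a.length + 1) 0) 0 (by simp)
        (by rw [show ((a.length : Int) - (j + (((a.length : Int) - 1 - j).toNat : Int) + 1)).toNat
              = 0 from by omega, rowV])
        (by
          intro m h1 h2
          have hmn : m = (a.length : Int) := by omega
          rw [hmn, PySem.List.pyGetD_eq_getElem _ 0 (by omega) (by simp),
              List.getElem_replicate,
              show ((a.length : Int) - (a.length : Int)).toNat = 0 from by omega, rowV])
        cb (by rw [hcb, hcnt])
      -- the new diag and the recursion
      have hcol_j1 : j + 1 ≤ (a.length : Int) → PySem.List.pyGetD cb.1 (j + 1) 0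
          = rowV a ((a.length : Int) - (j + 1)).toNat j := fun h => hcok (j + 1) le_rfl h
      set diag' := (stepOuterB a (diag, cols) j).1 with hdiag'
      have hstep2 : (stepOuterB a (diag, cols) j).2 = cb.1 :: cols := by
        rw [stepOuterB, hcb]
      have hdl' : diag'.length = a.length + 1 := by
        rw [hdiag', stepOuterB]
        by_cases h0 : (0 : Int) ≤ j
        · simp only [decide_eq_true_eq, if_pos h0,
            PySem.List.pySetD_of_nonneg _ _ (by omega : (0:Int) ≤ j + 1)]
          rw [List.length_set, hdl]
        · simp only [decide_eq_true_eq, if_neg h0]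
          exact hdl
      have hd' : DiagOK a (c : Int) diag' := by
        rw [hdiag', stepOuterB]
        by_cases h0 : (0 : Int) ≤ j
        · simp only [decide_eq_true_eq, if_pos h0]
          intro k h1 h2 h3
          rw [pyGetD_pySetD_int diag (j + 1) k _ 0 (by omega) (by omega) (by omega) (by omega)]
          by_cases hkj : k = j + 1
          · rw [if_pos hkj, hkj, ← hcb, hcol_j1 (by omega),
                show j + 1 - 1 = j from by omega]
          · rw [if_neg hkj]
            exact hd k (by omega) h2 h3
        · simp only [decide_eq_true_eq, if_neg h0]
          intro k h1 h2 h3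
          exact hd k (by omega) h2 h3
      have hRrec : R = (PySem.List.pyRange ((c : Int) - 2) (-2) (-1)).foldl (stepOuterB a)
          (diag', cb.1 :: cols) := by
        rw [hR, show stepOuterB a (diag, cols) j = (diag', cb.1 :: cols) from
          Prod.ext_iff.mpr ⟨hdiag'.symm, hstep2⟩]
      obtain ⟨L', hL1, hL2, hL3⟩ := ih (by omega) diag' (cb.1 :: cols) hdl' hd' R hRrec
      refine ⟨L' ++ [cb.1], by rw [hL1]; simp, by simp [hL2], ?_⟩
      intro j' h1 h2
      rw [hm] at h2
      by_cases hje : j' ≤ (c : Int) - 2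
      · rw [pyGetD_append_left' L' [cb.1] (j' + 1) [] (by omega) (by rw [hL2]; omega)]
        exact hL3 j' h1 hje
      · have hje' : j' = j := by omega
        subst hje'
        have : PySem.List.pyGetD (L' ++ [cb.1]) (j + 1) [] = cb.1 := by
          rw [PySem.List.pyGetD_eq_getElem _ [] (by omega) (by simp [hL2]; omega)]
          rw [List.getElem_append_right (by simp [hL2]; omega)]
          simp
        rw [this]
        exact hcok

lemma memoizeLSS_alt_unfold (a : List Int) :
    memoizeLSS_alt a =
      (PySem.List.pyRange ((a.length : Int) - 1) (-1) (-1)).foldl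
        (fun items i =>
          items ++ (PySem.List.pyRange (i - 1) (-2) (-1)).map
            (fun j => (i, j, PySem.List.pyGetD
              (PySem.List.pyGetD
                ((PySem.List.pyRange ((a.length : Int) - 1) (-2) (-1)).foldl (stepOuterB a)
                  (List.replicate (a.length + 1) 0, [])).2
                (j + 1) []) i 0)))
        ((PySem.List.pyRange (-1) (a.length : Int) 1).map
          (fun j => ((a.length : Int), j, (0 : Int)))) := rfl

theorem memoizeLSS_alt_eq_canon (a : List Int) :
    memoizeLSS_alt a = (canonPairs a).map (fun p => (p.1.1, p.1.2, p.2)) := by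
  obtain ⟨L, hL1, hL2, hL3⟩ := outerB a (a.length + 1) (by push_cast; omega)
    (List.replicate (a.length + 1) 0) [] (by simp)
    (fun k h1 _ h3 => absurd h3 (by push_cast at h1 ⊢; omega))
    ((PySem.List.pyRange ((a.length : Int) - 1) (-2) (-1)).foldl (stepOuterB a)
      (List.replicate (a.length + 1) 0, []))
    (by rw [show ((a.length + 1 : Nat) : Int) - 2 = (a.length : Int) - 1 from by push_cast; ring])
  rw [List.append_nil] at hL1
  rw [memoizeLSS_alt_unfold, hL1, PySem.List.foldl_append_eq_flatMap, canonPairs, List.map_append]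
  congr 1
  · rw [basePairs, List.map_map]
    rfl
  · rw [List.map_flatMap,
        PySem.List.pyRange_neg_one ((a.length : Int) - 1) (-1),
        show ((a.length : Int) - 1 - (-1)).toNat = a.length from by omega,
        List.flatMap_map]
    apply List.flatMap_congr
    intro t ht
    have htlt : t < a.length := List.mem_range.mp ht
    rw [rowPairs, List.map_map,
        show (a.length : Int) - ((t + 1 : Nat) : Int) - 1
          = ((a.length : Int) - 1 - (t : Int)) - 1 from by push_cast; ring]
    apply List.map_congr_left
    intro j hj
    rw [PySem.List.mem_pyRange_neg_one] at hj
    have hcol := hL3 j (by omega) (by push_cast; omega)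
      ((a.length : Int) - 1 - (t : Int)) (by omega) (by omega)
    simp only [Function.comp]
    rw [hcol,
        show ((a.length : Int) - ((a.length : Int) - 1 - (t : Int))).toNat = t + 1 from by omega,
        show (a.length : Int) - ((t + 1 : Nat) : Int)
          = (a.length : Int) - 1 - (t : Int) from by push_cast; ring]

-- ===== VERDICT (by name: the statement is the Claim_ definition above) =====
theorem memoizeLSS_spec : Claim_equal_memoizeLSS := by
  intro a _
  unfold Spec_memoizeLSS
  rw [memoizeLSS_eq_canon, memoizeLSS_alt_eq_canon]
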